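-- pv_equiv track=rewrite | github.com/YoSheep/pwnagent | modules/web_scan.py | _is_high_risk_path
-- ===== SOURCE A (Python) =====
-- def _is_high_risk_path(path: str) -> bool:
--     high_risk = [
--         ".env", ".git", ".svn", "phpinfo", "config", "backup",
--         "admin", "phpmyadmin", "adminer", "sql", "dump",
--         "shell", "cmd", "webshell",
--     ]
--     path_lower = path.lower()
--     return any(r in path_lower for r in high_risk)
-- ===== SOURCE B (Python) =====
-- def _is_high_risk_path(path: str) -> bool:
--     high_risk = [
--         ".env", ".git", ".svn", "phpinfo", "config", "backup",
--         "admin", "phpmyadmin", "adminer", "sql", "dump",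
--         "shell", "cmd", "webshell",
--     ]
--     p = path.lower()
--     # single left-to-right scan: at each position, test whether any pattern starts there
--     return any(p.startswith(r, i) for i in range(len(p) + 1) for r in high_risk)
-- ===== Notes on version B (the rewrite author's own statement) =====
-- stated objective: alternative
-- what changed: Replaces the per-pattern substring membership tests with a single positional left-to-right scan of the lowered path, testing at each offset whether any high-risk literal starts there via startswith.
import Mathlib
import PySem

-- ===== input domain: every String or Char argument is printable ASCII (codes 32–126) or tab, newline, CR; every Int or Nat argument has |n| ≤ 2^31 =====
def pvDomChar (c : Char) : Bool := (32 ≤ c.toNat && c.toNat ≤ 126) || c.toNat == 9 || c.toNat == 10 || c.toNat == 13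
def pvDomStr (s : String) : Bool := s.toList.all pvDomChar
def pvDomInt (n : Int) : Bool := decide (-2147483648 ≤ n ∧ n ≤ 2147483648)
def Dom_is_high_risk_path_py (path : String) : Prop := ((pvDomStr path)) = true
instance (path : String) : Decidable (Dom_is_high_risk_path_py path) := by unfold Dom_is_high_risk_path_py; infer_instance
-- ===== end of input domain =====

-- B replaces N independent substring membership tests with one positional scan testing startswith at each offset (alternative decomposition; return value only).
-- ===== PORT A =====
def pvHighRisk : List String :=
  [".env", ".git", ".svn", "phpinfo", "config", "backup",
   "admin", "phpmyadmin", "adminer", "sql", "dump",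
   "shell", "cmd", "webshell"]

def is_high_risk_path_py (path : String) : Bool :=
  let path_lower := PySem.Str.lower path
  pvHighRisk.any (fun r => PySem.Str.isIn r path_lower)

-- ===== PORT B =====
-- p.startswith(r, i) for 0 ≤ i ≤ len(p) is exactly: r is a prefix of p[i:] (PySem.Chars.startswith (p.drop i) r.toList)
def is_high_risk_path_py_alt (path : String) : Bool :=
  let p := PySem.Chars.lower path.toList
  (List.range (p.length + 1)).any
    (fun i => pvHighRisk.any (fun r => PySem.Chars.startswith (p.drop i) r.toList))

-- ===== PRECONDITION & SPEC =====
def Spec_is_high_risk_path_py (path : String) (out : Bool) : Prop := out = is_high_risk_path_py_alt path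
instance (path : String) (out : Bool) : Decidable (Spec_is_high_risk_path_py path out) := by unfold Spec_is_high_risk_path_py; infer_instance

-- ===== CLAIM (what is proved, stated in full; the proofs are below) =====
def Claim_equal_is_high_risk_path_py : Prop := ∀ (path : String), Dom_is_high_risk_path_py path → Spec_is_high_risk_path_py path (is_high_risk_path_py path)

-- ===== LEMMAS AND PROOFS =====

lemma any_swap {α β : Type} (l : List α) (m : List β) (f : α → β → Bool) :
    (l.any fun a => m.any fun b => f a b) = (m.any fun b => l.any fun a => f a b) := by
  rcases h : (m.any fun b => l.any fun a => f a b) with _ | _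
  · rw [List.any_eq_false] at h ⊢
    intro a ha hab
    rw [List.any_eq_true] at hab
    obtain ⟨b, hb, hf⟩ := hab
    exact (List.any_eq_false.mp (Bool.eq_false_iff.mpr (h b hb)) a ha) hf
  · rw [List.any_eq_true] at h ⊢
    obtain ⟨b, hb, hab⟩ := h
    rw [List.any_eq_true] at hab
    obtain ⟨a, ha, hf⟩ := hab
    exact ⟨a, ha, List.any_eq_true.mpr ⟨b, hb, hf⟩⟩

-- r occurs as a substring of p iff r starts at some offset i ≤ p.length
lemma isIn_eq_any_startswith (r p : List Char) :
    PySem.Chars.isIn r p =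
      (List.range (p.length + 1)).any (fun i => PySem.Chars.startswith (p.drop i) r) := by
  rcases h : PySem.Chars.isIn r p with _ | _
  · symm
    rw [List.any_eq_false]
    intro i _ hsw
    rw [PySem.Chars.startswith_iff] at hsw
    exact absurd ((PySem.Chars.exists_prefix_drop_iff_isIn r p).mp ⟨i, hsw⟩) (by simp [h])
  · symm
    rw [List.any_eq_true]
    obtain ⟨j, hj⟩ := (PySem.Chars.exists_prefix_drop_iff_isIn r p).mpr h
    by_cases hle : j ≤ p.length
    · exact ⟨j, List.mem_range.mpr (by omega), (PySem.Chars.startswith_iff _ _).mpr hj⟩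
    · refine ⟨p.length, List.mem_range.mpr (by omega), (PySem.Chars.startswith_iff _ _).mpr ?_⟩
      rw [List.drop_eq_nil_of_le (by omega)] at hj
      simp [List.prefix_nil.mp hj]
-- ===== VERDICT (by name: the statement is the Claim_ definition above) =====
theorem is_high_risk_path_py_spec : Claim_equal_is_high_risk_path_py := by
  intro path _
  unfold Spec_is_high_risk_path_py is_high_risk_path_py is_high_risk_path_py_alt
  simp only [PySem.Str.isIn_eq, PySem.Str.toList_lower]
  simp only [isIn_eq_any_startswith]
  exact any_swap _ _ _
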